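-- pv_equiv track=rewrite | github.com/Veger1/Thesis | PAPER/algorithm.py | set_covering
-- ===== SOURCE A (Python) =====
-- from typing import List, Tuple
--
-- def set_covering(intervals: List[Tuple[int, int]], existing_layers: List[int]) -> List[int]:
--     """
--     Determines the indices at which to place layers to cover all intervals.
--
--     Args:
--         intervals: A list of lists containing (start, end) intervals.
--         existing_layers: A list of already determined layer indices.
--
--     Returns:
--         A list of indices where layers should be placed.
--     """
--     # Flatten the intervals into a single list with their group index
--
--     # Sort intervals by start index for efficient processing
--     intervals.sort(key=lambda x: x[0])
--
--     # Convert existing layers to a set for fast lookup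
--     layer_set = set(existing_layers)
--
--     # Function to check if an interval is covered
--     def is_covered(start, end):
--         return any(start <= layer <= end for layer in layer_set)
--
--     # Place layers to cover all intervals
--     for start, end in intervals:
--         if not is_covered(start, end):
--             # Place a layer at the midpoint of the uncovered interval
--             new_layer = (start + end) // 2
--             layer_set.add(new_layer)
--
--     # Return the updated list of layer indices
--     return sorted(layer_set)
-- ===== SOURCE B (Python) =====
-- from bisect import bisect_left
-- from typing import List, Tuple
--
-- def set_covering(intervals: List[Tuple[int, int]], existing_layers: List[int]) -> List[int]:
--     # Same in-place sort of `intervals` as the original.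
--     intervals.sort(key=lambda x: x[0])
--     # Maintain the layers as a sorted, duplicate-free list.
--     layers = sorted(set(existing_layers))
--     for start, end in intervals:
--         # Covered iff the smallest layer >= start is <= end.
--         i = bisect_left(layers, start)
--         if not (i < len(layers) and layers[i] <= end):
--             m = (start + end) // 2
--             j = bisect_left(layers, m)
--             if j == len(layers) or layers[j] != m:
--                 layers.insert(j, m)
--     return layers
-- ===== Notes on version B (the rewrite author's own statement) =====
-- stated objective: faster
-- what changed: Instead of rescanning the whole layer set for every interval, B keeps the layers as a sorted duplicate-free list and decides coverage (and the insertion point of a new midpoint) by binary search, inserting in place.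
import Mathlib
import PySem

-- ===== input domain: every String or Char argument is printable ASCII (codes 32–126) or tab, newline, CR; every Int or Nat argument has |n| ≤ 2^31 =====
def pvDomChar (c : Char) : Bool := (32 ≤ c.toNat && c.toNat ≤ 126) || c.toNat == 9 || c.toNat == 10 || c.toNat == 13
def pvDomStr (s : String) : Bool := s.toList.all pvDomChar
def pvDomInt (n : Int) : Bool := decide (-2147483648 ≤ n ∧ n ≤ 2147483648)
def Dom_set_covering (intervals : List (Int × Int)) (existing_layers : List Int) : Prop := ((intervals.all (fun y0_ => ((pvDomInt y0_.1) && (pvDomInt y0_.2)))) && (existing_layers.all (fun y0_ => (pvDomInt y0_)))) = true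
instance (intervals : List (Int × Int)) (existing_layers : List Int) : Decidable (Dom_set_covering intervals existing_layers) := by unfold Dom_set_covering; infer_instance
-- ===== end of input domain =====

-- B replaces A's per-interval scan of the whole layer set by a sorted layer list with
-- binary-search coverage tests and in-place sorted insertion (faster; return value only:
-- both A and B sort `intervals` in place in Python).


-- ===== PORT A =====
-- is_covered(start, end): any(start <= layer <= end for layer in layer_set)
def pyIsCovered (layer_set : PySem.Set Int) (start e : Int) : Bool :=
  layer_set.any (fun l => decide (start ≤ l) && decide (l ≤ e))

def set_covering (intervals : List (Int × Int)) (existing_layers : List Int) : List Int :=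
  let sortedIntervals := PySem.List.sorted intervals (fun x => x.1) false
  let layer_set : PySem.Set Int := PySem.Set.ofList existing_layers
  let final := sortedIntervals.foldl
    (fun s p =>
      if pyIsCovered s p.1 p.2 then s
      else PySem.Set.add s (PySem.Int.floordiv (p.1 + p.2) 2))
    layer_set
  PySem.List.sorted final (fun x => x) false

-- ===== PORT B =====
-- one iteration of B's loop body over the sorted layer list
def altStep (layers : List Int) (p : Int × Int) : List Int :=
  let i := PySem.List.bisectLeft layers p.1
  if decide (i < layers.length) && decide (layers.getD i 0 ≤ p.2) then layers
  else
    let m := PySem.Int.floordiv (p.1 + p.2) 2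
    let j := PySem.List.bisectLeft layers m
    if decide (j = layers.length) || decide (layers.getD j 0 ≠ m) then
      layers.take j ++ m :: layers.drop j   -- layers.insert(j, m); exact since 0 ≤ j ≤ len(layers)
    else layers

def set_covering_alt (intervals : List (Int × Int)) (existing_layers : List Int) : List Int :=
  (PySem.List.sorted intervals (fun x => x.1) false).foldl altStep
    (PySem.List.sorted (PySem.Set.ofList existing_layers) (fun x => x) false)

-- ===== PRECONDITION & SPEC =====
def Spec_set_covering (intervals : List (Int × Int)) (existing_layers : List Int) (out : List Int) : Prop := out = set_covering_alt intervals existing_layers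
instance (intervals : List (Int × Int)) (existing_layers : List Int) (out : List Int) : Decidable (Spec_set_covering intervals existing_layers out) := by unfold Spec_set_covering; infer_instance

-- ===== CLAIM (what is proved, stated in full; the proofs are below) =====
def Claim_equal_set_covering : Prop := ∀ (intervals : List (Int × Int)) (existing_layers : List Int), Dom_set_covering intervals existing_layers → Spec_set_covering intervals existing_layers (set_covering intervals existing_layers)

-- ===== LEMMAS AND PROOFS =====

-- A's set-scan coverage test equals B's binary-search coverage test.
lemma covered_eq (S L : List Int) (hperm : L.Perm S) (hlt : L.Pairwise (· < ·))
    (start e : Int) :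
    pyIsCovered S start e
      = (decide (PySem.List.bisectLeft L start < L.length)
          && decide (L.getD (PySem.List.bisectLeft L start) 0 ≤ e)) := by
  have hle : L.Pairwise (· ≤ ·) := hlt.imp (fun h => le_of_lt h)
  obtain ⟨hlen, hlo, hhi⟩ := PySem.List.bisectLeft_spec L start hle
  set i := PySem.List.bisectLeft L start with hidef
  apply Bool.eq_iff_iff.mpr
  unfold pyIsCovered
  simp only [List.any_eq_true, Bool.and_eq_true, decide_eq_true_eq]
  constructor
  · rintro ⟨l, hlS, hs, hee⟩
    have hlL : l ∈ L := (hperm.mem_iff).2 hlS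
    obtain ⟨k, hk, rfl⟩ := List.mem_iff_getElem.1 hlL
    have hik : i ≤ k := by
      by_contra hik
      exact absurd (hlo k hk (by omega)) (not_lt.2 hs)
    have hilen : i < L.length := lt_of_le_of_lt hik hk
    refine ⟨hilen, ?_⟩
    rw [List.getD_eq_getElem L 0 hilen]
    rcases eq_or_lt_of_le hik with rfl | hik'
    · exact hee
    · exact le_trans (le_of_lt (List.pairwise_iff_getElem.1 hlt i k hilen hk hik')) hee
  · rintro ⟨hilen, hgd⟩
    refine ⟨L[i], (hperm.mem_iff).1 (List.getElem_mem hilen), hhi i hilen le_rfl, ?_⟩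
    rwa [List.getD_eq_getElem L 0 hilen] at hgd

-- Invariant preservation for one loop iteration.
lemma inv_step (S L : List Int) (p : Int × Int) (hperm : L.Perm S) (hlt : L.Pairwise (· < ·)) :
    (altStep L p).Perm
      (if pyIsCovered S p.1 p.2 then S
       else PySem.Set.add S (PySem.Int.floordiv (p.1 + p.2) 2))
      ∧ (altStep L p).Pairwise (· < ·) := by
  have hle : L.Pairwise (· ≤ ·) := hlt.imp (fun h => le_of_lt h)
  have hstep : altStep L p =
      (if decide (PySem.List.bisectLeft L p.1 < L.length)
            && decide (L.getD (PySem.List.bisectLeft L p.1) 0 ≤ p.2) then L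
       else
         if decide (PySem.List.bisectLeft L (PySem.Int.floordiv (p.1 + p.2) 2) = L.length)
              || decide (L.getD (PySem.List.bisectLeft L (PySem.Int.floordiv (p.1 + p.2) 2)) 0
                    ≠ PySem.Int.floordiv (p.1 + p.2) 2) then
           L.take (PySem.List.bisectLeft L (PySem.Int.floordiv (p.1 + p.2) 2))
             ++ PySem.Int.floordiv (p.1 + p.2) 2
               :: L.drop (PySem.List.bisectLeft L (PySem.Int.floordiv (p.1 + p.2) 2))
         else L) := rfl
  rw [hstep, ← covered_eq S L hperm hlt p.1 p.2]
  by_cases hcov : pyIsCovered S p.1 p.2 = true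
  · simp only [hcov, if_true]
    exact ⟨hperm, hlt⟩
  · simp only [hcov, Bool.false_eq_true, if_false]
    set m := PySem.Int.floordiv (p.1 + p.2) 2 with hmdef
    set j := PySem.List.bisectLeft L m with hjdef
    obtain ⟨hjlen, hlo, hhi⟩ := PySem.List.bisectLeft_spec L m hle
    rw [← hjdef] at hjlen hlo hhi
    by_cases hm : m ∈ L
    · -- m already a layer: B keeps the list, A's set.add is a no-op
      obtain ⟨k, hk, hkm⟩ := List.mem_iff_getElem.1 hm
      have hjk : j ≤ k := by
        by_contra hjk
        exact absurd (hlo k hk (by omega)) (by omega)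
      have hjlt : j < L.length := lt_of_le_of_lt hjk hk
      have hLj : L[j] = m := by
        have h1 : m ≤ L[j] := hhi j hjlt le_rfl
        rcases eq_or_lt_of_le hjk with rfl | hjk'
        · exact hkm
        · have := List.pairwise_iff_getElem.1 hlt j k hjlt hk hjk'
          omega
      have hcond : (decide (j = L.length) || decide (L.getD j 0 ≠ m)) = false := by
        have hne : j ≠ L.length := by omega
        simp [hne, List.getElem?_eq_getElem hjlt, hLj]
      rw [hcond]
      simp only [Bool.false_eq_true, if_false]
      have hmS : m ∈ S := (hperm.mem_iff).1 hm
      have hadd : PySem.Set.add S m = S := by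
        simp [PySem.Set.add, PySem.Set.contains, List.contains_eq_mem, hmS]
      rw [hadd]
      exact ⟨hperm, hlt⟩
    · -- m is new: B inserts it at position j, A appends it to the set
      have htake : ∀ x ∈ L.take j, x < m := by
        intro x hx
        obtain ⟨k, hk, hkx⟩ := List.mem_iff_getElem.1 hx
        have hk' := hk
        simp only [List.length_take, lt_min_iff] at hk'
        rw [List.getElem_take] at hkx
        rw [← hkx]; exact hlo k hk'.2 hk'.1
      have hdrop : ∀ x ∈ L.drop j, m < x := by
        intro x hx
        obtain ⟨k, hk, hkx⟩ := List.mem_iff_getElem.1 hx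
        have hjk : j + k < L.length := by simp only [List.length_drop] at hk; omega
        rw [List.getElem_drop] at hkx
        have h1 : m ≤ L[j + k] := hhi (j + k) hjk (by omega)
        have h2 : L[j + k] ≠ m := fun h => hm (h ▸ List.getElem_mem hjk)
        rw [← hkx]; omega
      have hcond : (decide (j = L.length) || decide (L.getD j 0 ≠ m)) = true := by
        rcases eq_or_lt_of_le hjlen with heq | hjlt
        · simp [heq]
        · have hLjne : L[j] ≠ m := fun h => hm (h ▸ List.getElem_mem hjlt)
          simp [List.getElem?_eq_getElem hjlt, hLjne]
      rw [hcond]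
      simp only [if_true]
      have hmS : m ∉ S := fun h => hm ((hperm.mem_iff).2 h)
      have hadd : PySem.Set.add S m = S ++ [m] := by
        simp [PySem.Set.add, PySem.Set.contains, List.contains_eq_mem, hmS]
      rw [hadd]
      constructor
      · have h0 : (L.take j ++ m :: L.drop j).Perm (m :: L) := by
          have h1 := @List.perm_middle _ m (L.take j) (L.drop j)
          rwa [List.take_append_drop] at h1
        exact h0.trans ((hperm.cons m).trans (List.perm_append_singleton m S).symm)
      · rw [List.pairwise_append]
        refine ⟨List.Pairwise.sublist (List.take_sublist _ _) hlt, ?_, ?_⟩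
        · rw [List.pairwise_cons]
          exact ⟨hdrop, List.Pairwise.sublist (List.drop_sublist _ _) hlt⟩
        · intro a ha b hb
          rcases List.mem_cons.1 hb with rfl | hb'
          · exact htake a ha
          · exact lt_trans (htake a ha) (hdrop b hb')

lemma inv_fold (l : List (Int × Int)) (S L : List Int)
    (hperm : L.Perm S) (hlt : L.Pairwise (· < ·)) :
    (l.foldl altStep L).Perm
      (l.foldl (fun s p =>
        if pyIsCovered s p.1 p.2 then s
        else PySem.Set.add s (PySem.Int.floordiv (p.1 + p.2) 2)) S)
      ∧ (l.foldl altStep L).Pairwise (· < ·) := by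
  induction l generalizing S L with
  | nil => exact ⟨hperm, hlt⟩
  | cons p t ih =>
      obtain ⟨h1, h2⟩ := inv_step S L p hperm hlt
      exact ih _ _ h1 h2

-- ===== VERDICT (by name: the statement is the Claim_ definition above) =====
theorem set_covering_spec : Claim_equal_set_covering := by
  intro intervals existing_layers _
  unfold Spec_set_covering set_covering set_covering_alt
  obtain ⟨hperm, hlt⟩ := inv_fold (PySem.List.sorted intervals (fun x => x.1) false)
    (PySem.Set.ofList existing_layers)
    (PySem.List.sorted (PySem.Set.ofList existing_layers) (fun x => x) false)
    (PySem.List.sorted_perm _ _ _) (PySem.List.sorted_ofList_pairwise_lt _)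
  exact PySem.List.sorted_eq_of_perm_of_pairwise_lt _ _ (fun x => x) hperm hlt
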